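-- pv_equiv track=rewrite | github.com/Zarivate/Coding-Questions | Strings/semordnilap_backwards_words.py | semordnilap_cleaner
-- ===== SOURCE A (Python) =====
-- def semordnilap_cleaner(words):
--     # Initialize a set
--     words_set = set([])
--     # Create answer array
--     answers = []
--     # Iterate through array
--     for word in words:
--         # Reverse the word and store it within a variable
--         reverse = word[::-1]
--         # Check if reverse word exists in set
--         if reverse in words_set:
--             # If so, add pair to answers array
--             answers.append([word, reverse])
--         # Else if word doesn't exist in Set yet, just add it to the Set
--         words_set.add(word)
--
--     return answers
-- ===== SOURCE B (Python) =====
-- def semordnilap_cleaner(words):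
--     # Stage 1: precompute the first-occurrence index of every word in one pass.
--     first = {}
--     for i, w in enumerate(words):
--         if w not in first:
--             first[w] = i
--     n = len(words)
--     # Stage 2: a word pairs up exactly when its reversal first occurs strictly earlier.
--     return [[w, w[::-1]] for i, w in enumerate(words) if first.get(w[::-1], n) < i]
-- ===== Notes on version B (the rewrite author's own statement) =====
-- stated objective: alternative
-- what changed: Replaced A's incrementally maintained seen-set with a staged algorithm: one pass precomputes a first-occurrence-index map of the whole list, then a comprehension selects words whose reversal's first occurrence index is strictly smaller than their own index.
import Mathlib
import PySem

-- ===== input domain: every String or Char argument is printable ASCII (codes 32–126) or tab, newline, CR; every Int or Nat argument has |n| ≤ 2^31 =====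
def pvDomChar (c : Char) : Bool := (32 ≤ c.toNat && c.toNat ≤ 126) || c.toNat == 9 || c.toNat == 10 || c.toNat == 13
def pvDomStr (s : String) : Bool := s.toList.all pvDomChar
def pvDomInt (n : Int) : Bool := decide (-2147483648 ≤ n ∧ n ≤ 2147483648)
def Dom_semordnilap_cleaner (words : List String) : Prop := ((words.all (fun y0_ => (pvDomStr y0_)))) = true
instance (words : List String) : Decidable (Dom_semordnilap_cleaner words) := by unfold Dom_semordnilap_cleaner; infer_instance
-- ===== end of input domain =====

-- B replaces A's incrementally maintained seen-set by a staged algorithm: precompute each word's first-occurrence index, then select words whose reversal first occurs strictly earlier (alternative decomposition, same output).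


-- ===== PORT A =====
-- word[::-1] = PySem.Str.slice? word none none (-1); step -1 never raises, so getD "" is safe
def semordnilap_cleaner (words : List String) : List (List String) :=
  (words.foldl
    (fun (st : PySem.Set String × List (List String)) word =>
      let reverse := (PySem.Str.slice? word none none (-1)).getD ""
      let answers := if PySem.Set.contains st.1 reverse then st.2 ++ [[word, reverse]] else st.2
      (PySem.Set.add st.1 word, answers))
    (PySem.Set.empty, [])).2

-- ===== PORT B =====
-- Stage 1: first-occurrence-index dict built over the whole list ('if w not in first: first[w] = i').
-- Stage 2: the comprehension keeps (i, w) exactly when first.get(w[::-1], len(words)) < i.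
def semordnilap_cleaner_alt (words : List String) : List (List String) :=
  let first := (PySem.List.enumerate words 0).foldl
    (fun (d : PySem.Dict String Int) p =>
      if PySem.Dict.contains d p.2 then d else PySem.Dict.insert d p.2 p.1)
    PySem.Dict.empty
  (PySem.List.enumerate words 0).foldl
    (fun answers p =>
      let reverse := (PySem.Str.slice? p.2 none none (-1)).getD ""
      if PySem.Dict.getD first reverse ((words.length : Int)) < p.1
      then answers ++ [[p.2, reverse]] else answers)
    []

-- ===== PRECONDITION & SPEC =====
def Spec_semordnilap_cleaner (words : List String) (out : List (List String)) : Prop := out = semordnilap_cleaner_alt words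
instance (words : List String) (out : List (List String)) : Decidable (Spec_semordnilap_cleaner words out) := by unfold Spec_semordnilap_cleaner; infer_instance

-- ===== CLAIM (what is proved, stated in full; the proofs are below) =====
def Claim_equal_semordnilap_cleaner : Prop := ∀ (words : List String), Dom_semordnilap_cleaner words → Spec_semordnilap_cleaner words (semordnilap_cleaner words)

-- ===== LEMMAS AND PROOFS =====

-- The first-occurrence fold, characterised: its lookup is the first index of r in ws (offset by s),
-- unless r is already a key of the accumulator d.
theorem firstFold_getD (r : String) (dflt : Int) :
    ∀ (ws : List String) (d : PySem.Dict String Int) (s : Int),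
      PySem.Dict.getD
        ((PySem.List.enumerate ws s).foldl
          (fun (d : PySem.Dict String Int) p =>
            if PySem.Dict.contains d p.2 then d else PySem.Dict.insert d p.2 p.1) d)
        r dflt
      = if PySem.Dict.contains d r then PySem.Dict.getD d r dflt
        else if r ∈ ws then s + (ws.idxOf r : Int) else dflt := by
  intro ws
  induction ws with
  | nil =>
    intro d s
    simp only [PySem.List.enumerate_nil, List.foldl_nil, List.not_mem_nil, if_false]
    by_cases h : PySem.Dict.contains d r
    · rw [if_pos h]
    · rw [if_neg (by simp [h]), PySem.Dict.getD_of_not_contains d dflt (by simpa using h)]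
  | cons w ws ih =>
    intro d s
    rw [PySem.List.enumerate_cons]
    simp only [List.foldl_cons]
    by_cases hdc : PySem.Dict.contains d r
    · by_cases hwc : PySem.Dict.contains d w
      · simp only [hwc, if_pos, ih, hdc]
      · have hwr : w ≠ r := fun h => hwc (h ▸ hdc)
        rw [if_neg (by simp [hwc])]
        rw [ih]
        rw [if_pos (by simp [PySem.Dict.contains_insert, hdc])]
        rw [if_pos hdc]
        exact PySem.Dict.getD_insert_of_ne d s dflt (fun h => hwr h.symm)
    · by_cases hwr : w = r
      · subst hwr
        rw [if_neg (by simp [hdc])]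
        rw [ih]
        rw [if_pos (by simp)]
        rw [if_neg hdc, if_pos (List.mem_cons_self), List.idxOf_cons_self]
        simp [PySem.Dict.getD_insert_self]
      · have hmemiff : r ∈ w :: ws ↔ r ∈ ws := by simp [List.mem_cons, Ne.symm hwr]
        have hidx : (w :: ws).idxOf r = ws.idxOf r + 1 := List.idxOf_cons_ne ws hwr
        by_cases hwc : PySem.Dict.contains d w
        · rw [if_pos hwc, ih, if_neg hdc, if_neg hdc, hidx]
          simp only [hmemiff]
          split_ifs with h
          · push_cast; ring
          · rfl
        · rw [if_neg (by simp [hwc])]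
          rw [ih]
          rw [if_neg (by simp [PySem.Dict.contains_insert, hdc, Ne.symm hwr])]
          rw [if_neg hdc, hidx]
          simp only [hmemiff]
          split_ifs with h
          · push_cast; ring
          · rfl

-- Specialised to B's actual first map: its lookup with default len(words) IS the idxOf.
theorem first_getD_eq_idxOf (words : List String) (r : String) :
    PySem.Dict.getD
      ((PySem.List.enumerate words 0).foldl
        (fun (d : PySem.Dict String Int) p =>
          if PySem.Dict.contains d p.2 then d else PySem.Dict.insert d p.2 p.1)
        PySem.Dict.empty)
      r ((words.length : Int))
    = (words.idxOf r : Int) := by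
  rw [firstFold_getD]
  rw [if_neg (by simp [PySem.Dict.contains_empty])]
  by_cases h : r ∈ words
  · simp [h]
  · rw [if_neg h, List.idxOf_eq_length h]

-- B's index test equals membership in the prefix of earlier words (k ≤ len).
theorem idxOf_lt_iff_mem_take (words : List String) (r : String) (k : Nat) (hk : k ≤ words.length) :
    ((words.idxOf r : Int) < (k : Int)) ↔ r ∈ words.take k := by
  rw [Int.ofNat_lt]
  constructor
  · intro h
    have hm : r ∈ words := by
      by_contra hnm
      rw [List.idxOf_eq_length hnm] at h; omega
    exact (List.mem_take_iff_idxOf_lt hm).mpr h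
  · intro h
    exact (List.mem_take_iff_idxOf_lt (List.mem_of_mem_take h)).mp h

-- Main invariant: after k words, A's state is (set of words.take k, acc), and the remaining
-- loops agree, B's side testing the precomputed first-occurrence index against k.
theorem loop_eq (words : List String) :
    ∀ (ws : List String) (k : Nat) (acc : List (List String)),
      words.drop k = ws →
      (ws.foldl
        (fun (st : PySem.Set String × List (List String)) word =>
          let reverse := (PySem.Str.slice? word none none (-1)).getD ""
          let answers := if PySem.Set.contains st.1 reverse then st.2 ++ [[word, reverse]] else st.2
          (PySem.Set.add st.1 word, answers))
        (PySem.Set.ofList (words.take k), acc)).2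
      =
      (PySem.List.enumerate ws (k : Int)).foldl
        (fun answers p =>
          let reverse := (PySem.Str.slice? p.2 none none (-1)).getD ""
          if PySem.Dict.getD
              ((PySem.List.enumerate words 0).foldl
                (fun (d : PySem.Dict String Int) p =>
                  if PySem.Dict.contains d p.2 then d else PySem.Dict.insert d p.2 p.1)
                PySem.Dict.empty)
              reverse ((words.length : Int)) < p.1
          then answers ++ [[p.2, reverse]] else answers)
        acc := by
  intro ws
  induction ws with
  | nil => intro k acc _; simp [PySem.List.enumerate]
  | cons w ws ih =>
    intro k acc hdrop
    have hk : k < words.length := by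
      by_contra h
      push Not at h
      simp [List.drop_eq_nil_of_le h] at hdrop
    have hw : words[k] = w := by
      have := List.getElem_drop (xs := words) (i := k) (j := 0) (h := by simpa using hk)
      simpa [hdrop] using this.symm
    have htake : words.take (k + 1) = words.take k ++ [w] := by
      rw [List.take_add_one, List.getElem?_eq_getElem hk, hw]; rfl
    have hdrop' : words.drop (k + 1) = ws := by
      have := List.drop_drop (i := 1) (j := k) (l := words)
      rw [← this, hdrop]; rfl
    rw [PySem.List.enumerate_cons]
    simp only [List.foldl_cons]
    rw [first_getD_eq_idxOf]
    set rev := (PySem.Str.slice? w none none (-1)).getD "" with hrev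
    have hcond : ((words.idxOf rev : Int) < (k : Int)) ↔ rev ∈ words.take k :=
      idxOf_lt_iff_mem_take words rev k (le_of_lt hk)
    have hA : PySem.Set.contains (PySem.Set.ofList (words.take k)) rev
        = decide (rev ∈ words.take k) := by
      simp [PySem.Set.contains_eq_listContains, PySem.Set.mem_ofList]
    have hset : PySem.Set.add (PySem.Set.ofList (words.take k)) w
        = PySem.Set.ofList (words.take (k + 1)) := by
      rw [htake, PySem.Set.ofList_append_singleton]
    have hstep : ((k : Int) + 1) = ((k + 1 : Nat) : Int) := by push_cast; ring
    by_cases hmem : rev ∈ words.take k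
    · rw [if_pos (hcond.mpr hmem)]
      simp only [hA, hmem, decide_true, if_true]
      rw [hset, hstep]
      exact ih (k + 1) _ hdrop'
    · rw [if_neg (fun h => hmem (hcond.mp h))]
      simp only [hA, hmem, decide_false]
      rw [hset, hstep]
      exact ih (k + 1) _ hdrop'

-- ===== VERDICT (by name: the statement is the Claim_ definition above) =====
theorem semordnilap_cleaner_spec : Claim_equal_semordnilap_cleaner := by
  intro words _
  unfold Spec_semordnilap_cleaner semordnilap_cleaner semordnilap_cleaner_alt
  have h := loop_eq words words 0 [] (by simp)
  simpa using h
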